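-- pv_equiv track=rewrite | github.com/JaeY0ung/Programmers | 1차문제집/practice3.py | solution
-- ===== SOURCE A (Python) =====
-- def solution(order):
--     containerBelt = [i+1 for i in range(len(order))] # [1,2,3,4,5]    #앞에서부터 빼고 넣음.
--     bozoBelt = []    # 뒤에서부터 넣고 뺌.
--     bozoBelt.extend(containerBelt[ :order[0] - 1])   # containerBelt[num-1] 은 트럭으로.
--     containerBelt = containerBelt[order[0]: ]
--     count = 1
--
--     for things in order[1:]:
--
--         # if things in containerBelt:
--         #     x = containerBelt.index(things)
--         #     bozoBelt.extend(containerBelt[ : x])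
--         #     containerBelt = containerBelt[ x + 1 : ]
--         #     count += 1
--
--         if bozoBelt ==[]:
--             if things in containerBelt:
--                 x = containerBelt.index(things)
--                 bozoBelt.extend(containerBelt[ : x])
--                 containerBelt = containerBelt[ x + 1 : ]
--                 count += 1
--             else:
--                 break
--
--         elif bozoBelt !=[]:
--             if bozoBelt[-1] == things:
--                 count += 1
--                 del bozoBelt[-1]
--             elif things in containerBelt:
--                 x = containerBelt.index(things)
--                 bozoBelt.extend(containerBelt[ : x])
--                 containerBelt = containerBelt[ x + 1 : ]
--                 count += 1
--             else:
--                 break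
--
--     return count
-- ===== SOURCE B (Python) =====
-- def solution(order):
--     # Box-driven simulation: feed belt boxes one by one, greedily loading the
--     # next waiting truck from the side stack whenever its box is on top.
--     n = len(order)
--     boxes = range(1, n + 1)
--     first = order[0]
--     # the first truck takes its box; boxes before it wait on the side stack
--     stack = list(boxes[:first - 1])
--     loaded = 1
--     for b in boxes[first:]:
--         while loaded < n and stack and stack[-1] == order[loaded]:
--             stack.pop()
--             loaded += 1
--         stack.append(b)
--     while loaded < n and stack and stack[-1] == order[loaded]:
--         stack.pop()
--         loaded += 1
--     return loaded
-- ===== Notes on version B (the rewrite author's own statement) =====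
-- stated objective: alternative
-- what changed: Replaces A's truck-driven loop, which per truck does a membership test, an .index scan and rebuilds both belts by slicing, with the box-driven simulation: feed the belt boxes one by one into a side stack and greedily load waiting trucks whenever their box is on top (classic validate-stack-sequence scheme); Pre_ excludes only the empty list, where both A and B raise IndexError reading the first element.
import Mathlib
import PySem

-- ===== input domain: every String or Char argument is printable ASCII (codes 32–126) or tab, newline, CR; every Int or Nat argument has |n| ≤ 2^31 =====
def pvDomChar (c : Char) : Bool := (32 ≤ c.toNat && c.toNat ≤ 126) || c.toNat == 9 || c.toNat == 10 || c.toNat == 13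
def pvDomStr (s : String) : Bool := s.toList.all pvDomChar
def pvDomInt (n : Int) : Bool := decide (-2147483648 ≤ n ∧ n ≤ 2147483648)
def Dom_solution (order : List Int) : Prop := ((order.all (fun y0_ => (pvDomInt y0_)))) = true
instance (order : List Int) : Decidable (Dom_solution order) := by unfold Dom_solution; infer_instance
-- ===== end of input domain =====

-- B replaces A's truck-driven loop (membership test, .index scan and slice rebuild per truck)
-- by the box-driven simulation: feed belt boxes one by one and greedily load waiting trucks
-- from the side stack; return value only (neither version mutates its argument).

-- ===== PORT A =====
-- loop over order[1:], carrying (bozoBelt, containerBelt, count); 'break' / loop end return count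
def loopA : List Int → List Int → List Int → Int → Int
  | [], _bozo, _cont, count => count
  | t :: rest, bozo, cont, count =>
    if bozo = [] then
      match PySem.List.index? cont t with   -- 'things in containerBelt' + '.index(things)'
      | some x => loopA rest (bozo ++ cont.take x) (cont.drop (x + 1)) (count + 1)
          -- cont[:x] / cont[x+1:] with x a valid nonnegative index: slice = take/drop here
      | none => count                        -- break
    else
      if PySem.List.pyGet? bozo (-1) = some t then   -- bozoBelt[-1] == things
        loopA rest bozo.dropLast cont (count + 1)    -- del bozoBelt[-1]
      else
        match PySem.List.index? cont t with
        | some x => loopA rest (bozo ++ cont.take x) (cont.drop (x + 1)) (count + 1)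
        | none => count                      -- break

def solution (order : List Int) : Int :=
  match PySem.List.pyGet? order 0 with
  | none => 0     -- order[0] raises IndexError on []; excluded by Pre_solution
  | some t =>
    let containerBelt := (PySem.List.pyRange 0 (order.length : Int) 1).map (fun i => i + 1)
    let bozoBelt := PySem.List.slice containerBelt none (some (t - 1))   -- containerBelt[:order[0]-1]
    let containerBelt := PySem.List.slice containerBelt (some t) none    -- containerBelt[order[0]:]
    loopA (PySem.List.slice order (some 1) none) bozoBelt containerBelt 1

-- ===== PORT B =====
-- 'while loaded < n and stack and stack[-1] == order[loaded]: stack.pop(); loaded += 1'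
def popAllB (order : List Int) (n : Int) (stack : List Int) (loaded : Int) : List Int × Int :=
  if loaded < n then
    match h : stack.getLast? with
    | some top =>
      if PySem.List.pyGet? order loaded = some top then
        popAllB order n stack.dropLast (loaded + 1)
      else (stack, loaded)
    | none => (stack, loaded)
  else (stack, loaded)
termination_by stack.length
decreasing_by
  have hne : stack ≠ [] := by intro e; subst e; simp at h
  have : 0 < stack.length := List.length_pos_iff.mpr hne
  simp [List.length_dropLast]; omega

-- 'for b in boxes[first:]: <pop-while>; stack.append(b)' then the final pop-while
def loopPush (order : List Int) (n : Int) : List Int → List Int → Int → Int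
  | [], stack, loaded => (popAllB order n stack loaded).2
  | b :: bs, stack, loaded =>
    let p := popAllB order n stack loaded
    loopPush order n bs (p.1 ++ [b]) p.2

def solution_alt (order : List Int) : Int :=
  match order with
  | [] => 0     -- order[0] raises IndexError on []; excluded by Pre_solution
  | t :: rest =>
    let n : Int := ((t :: rest).length : Int)
    let boxes := PySem.List.pyRange 1 (n + 1) 1          -- range(1, n+1)
    let stack := PySem.List.slice boxes none (some (t - 1))   -- boxes[:first-1]
    loopPush (t :: rest) n (PySem.List.slice boxes (some t) none) stack 1

-- ===== PRECONDITION & SPEC =====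
-- Pre_ excludes only the empty list, on which A raises IndexError (order[0]).
def Pre_solution (order : List Int) : Prop := order ≠ []
instance (order : List Int) : Decidable (Pre_solution order) := by unfold Pre_solution; infer_instance
def pvWitness_solution : List Int := ([1, 3, 2])

def Spec_solution (order : List Int) (out : Int) : Prop := out = solution_alt order
instance (order : List Int) (out : Int) : Decidable (Spec_solution order out) := by unfold Spec_solution; infer_instance

-- ===== CLAIM (what is proved, stated in full; the proofs are below) =====
def Claim_equal_solution : Prop := ∀ (order : List Int), Dom_solution order → Pre_solution order → Spec_solution order (solution order)

-- ===== LEMMAS AND PROOFS =====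

-- intermediate, truck-driven form with a front pointer c (the container belt of A is always
-- the contiguous range [c..n]); A's loop is reduced to it, then it is reduced to B's loop
def loopT : List Int → List Int → Int → Int → Int → Int
  | [], _stack, _c, _n, count => count
  | t :: rest, stack, c, n, count =>
    if stack.getLast? = some t then
      loopT rest stack.dropLast c n (count + 1)
    else if c ≤ t ∧ t ≤ n then
      loopT rest (stack ++ PySem.List.pyRange c t 1) (t + 1) n (count + 1)
    else count

lemma take_pyRange (c b t : Int) (h1 : c ≤ t) (h2 : t ≤ b) :
    (PySem.List.pyRange c b 1).take (t - c).toNat = PySem.List.pyRange c t 1 := by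
  rw [PySem.List.pyRange_one_append c t b h1 h2]
  exact List.take_left' (by rw [PySem.List.length_pyRange_one])

lemma drop_pyRange (c b t : Int) (h1 : c ≤ t) (h2 : t < b) :
    (PySem.List.pyRange c b 1).drop ((t - c).toNat + 1) = PySem.List.pyRange (t + 1) b 1 := by
  rw [PySem.List.pyRange_one_append c (t+1) b (by omega) (by omega),
      PySem.List.pyRange_one_succ_right h1]
  exact List.drop_left' (by simp [PySem.List.length_pyRange_one])

lemma index?_pyRange_of_mem (c b t : Int) (h1 : c ≤ t) (h2 : t < b) :
    PySem.List.index? (PySem.List.pyRange c b 1) t = some (t - c).toNat := by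
  rw [PySem.List.index?_eq_some_iff]
  refine ⟨PySem.List.pyRange c t 1, PySem.List.pyRange (t+1) b 1, ?_, ?_, ?_⟩
  · rw [PySem.List.pyRange_one_append c t b h1 (by omega)]
    rw [PySem.List.pyRange_one_cons h2]
  · rw [PySem.List.length_pyRange_one]
  · rw [PySem.List.mem_pyRange_one]; omega

lemma index?_pyRange_of_not_mem (c b t : Int) (h : ¬ (c ≤ t ∧ t < b)) :
    PySem.List.index? (PySem.List.pyRange c b 1) t = none := by
  rw [PySem.List.index?_eq_none_iff, PySem.List.mem_pyRange_one]; omega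

-- A's container belt is always the contiguous range [c..n]: A's loop steps like loopT
lemma loopA_eq_loopT (rest : List Int) : ∀ (bozo : List Int) (c n count : Int),
    loopA rest bozo (PySem.List.pyRange c (n + 1) 1) count = loopT rest bozo c n count := by
  induction rest with
  | nil => intro bozo c n count; rfl
  | cons t rest ih =>
    intro bozo c n count
    simp only [loopA, loopT]
    have hstep : (match PySem.List.index? (PySem.List.pyRange c (n+1) 1) t with
        | some x => loopA rest (bozo ++ (PySem.List.pyRange c (n+1) 1).take x)
            ((PySem.List.pyRange c (n+1) 1).drop (x + 1)) (count + 1)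
        | none => count) =
        (if c ≤ t ∧ t ≤ n then
          loopT rest (bozo ++ PySem.List.pyRange c t 1) (t + 1) n (count + 1)
        else count) := by
      by_cases hm : c ≤ t ∧ t ≤ n
      · rw [index?_pyRange_of_mem c (n+1) t hm.1 (by omega)]
        simp only [take_pyRange c (n+1) t hm.1 (by omega),
          drop_pyRange c (n+1) t hm.1 (by omega), if_pos hm]
        exact ih _ _ _ _
      · rw [index?_pyRange_of_not_mem c (n+1) t (by omega), if_neg hm]
    by_cases hb : bozo = []
    · subst hb
      rw [if_pos rfl, if_neg (by simp : ¬(List.getLast? ([] : List Int) = some t))]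
      exact hstep
    · rw [if_neg hb, PySem.List.pyGet?_neg_one]
      by_cases hl : bozo.getLast? = some t
      · rw [if_pos hl, if_pos hl]; exact ih _ _ _ _
      · rw [if_neg hl, if_neg hl]; exact hstep

lemma map_add_one_pyRange (n : Int) :
    (PySem.List.pyRange 0 n 1).map (fun i => i + 1) = PySem.List.pyRange 1 (n + 1) 1 := by
  rw [PySem.List.pyRange_one 0 n, PySem.List.pyRange_one 1 (n + 1)]
  rw [List.map_map]
  have h : (n - 0).toNat = (n + 1 - 1).toNat := by omega
  rw [h]
  apply List.map_congr_left
  intro k _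
  simp
  omega

def clampI (i n : Int) : Int := max 0 (min n (if i < 0 then i + n else i))

lemma clampI_eq (i N : Int) (hN : 0 ≤ N) :
    clampI i N = ((PySem.List.clampIdx N.toNat i : Nat) : Int) := by
  simp only [clampI, PySem.List.clampIdx]
  split_ifs <;> omega

lemma take_pyRange_nat (c b : Int) (k : Nat) (h : (k : Int) ≤ b - c) :
    (PySem.List.pyRange c b 1).take k = PySem.List.pyRange c (c + k) 1 := by
  rw [PySem.List.pyRange_one_append c (c + k) b (by omega) (by omega)]
  exact List.take_left' (by rw [PySem.List.length_pyRange_one]; omega)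

lemma drop_pyRange_nat (c b : Int) (k : Nat) (h : (k : Int) ≤ b - c) :
    (PySem.List.pyRange c b 1).drop k = PySem.List.pyRange (c + k) b 1 := by
  rw [PySem.List.pyRange_one_append c (c + k) b (by omega) (by omega)]
  exact List.drop_left' (by rw [PySem.List.length_pyRange_one]; omega)

lemma slice_none_some' (xs : List Int) (b : Int) :
    PySem.List.slice xs none (some b) = xs.take (PySem.List.clampIdx xs.length b) := by
  simp [PySem.List.slice]

lemma slice_to_pyRange (N b : Int) (hN : 0 ≤ N) :
    PySem.List.slice (PySem.List.pyRange 1 (N + 1) 1) none (some b) =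
      PySem.List.pyRange 1 (clampI b N + 1) 1 := by
  rw [slice_none_some', PySem.List.length_pyRange_one,
      show (N + 1 - 1).toNat = N.toNat by omega, clampI_eq b N hN]
  have hle := PySem.List.clampIdx_le N.toNat b
  rw [take_pyRange_nat 1 (N + 1) _ (by omega)]
  ring_nf

lemma slice_from_pyRange (N a : Int) (hN : 0 ≤ N) :
    PySem.List.slice (PySem.List.pyRange 1 (N + 1) 1) (some a) none =
      PySem.List.pyRange (clampI a N + 1) (N + 1) 1 := by
  rw [PySem.List.slice_some_none, PySem.List.length_pyRange_one,
      show (N + 1 - 1).toNat = N.toNat by omega, clampI_eq a N hN]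
  have hle := PySem.List.clampIdx_le N.toNat a
  rw [drop_pyRange_nat 1 (N + 1) _ (by omega)]
  ring_nf

-- ----- B-side loop lemmas -----

lemma popAllB_stop (order : List Int) (n : Int) (stack : List Int) (j : Int) (h : ¬ j < n) :
    popAllB order n stack j = (stack, j) := by
  rw [popAllB]; simp [h]

lemma popAllB_noop (order : List Int) (n : Int) (stack : List Int) (j t : Int)
    (ht : PySem.List.pyGet? order j = some t) (hl : stack.getLast? ≠ some t) :
    popAllB order n stack j = (stack, j) := by
  rw [popAllB]
  split_ifs with hj
  · split
    · next top h =>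
        have hne : ¬ PySem.List.pyGet? order j = some top := by
          rw [ht]
          intro e
          apply hl
          rw [h]
          injection e with e'
          rw [e']
        rw [if_neg hne]
    · next h => rfl
  · rfl

lemma popAllB_pop (order : List Int) (n : Int) (stack : List Int) (j t : Int)
    (hj : j < n) (hl : stack.getLast? = some t) (ht : PySem.List.pyGet? order j = some t) :
    popAllB order n stack j = popAllB order n stack.dropLast (j + 1) := by
  rw [popAllB]
  simp only [if_pos hj]
  split
  · next top h => rw [hl] at h; cases h; simp [ht]
  · next h => rw [hl] at h; cases h

lemma loopPush_congr (order : List Int) (n : Int) (bs : List Int)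
    (s j s' j' : _) (h : popAllB order n s j = popAllB order n s' j') :
    loopPush order n bs s j = loopPush order n bs s' j' := by
  cases bs with
  | nil => simp only [loopPush, h]
  | cons b bs => simp only [loopPush, h]

lemma loopPush_done (order : List Int) (n : Int) : ∀ (bs stack : List Int) (j : Int),
    ¬ j < n → loopPush order n bs stack j = j := by
  intro bs
  induction bs with
  | nil => intro stack j h; simp only [loopPush, popAllB_stop order n stack j h]
  | cons b bs ih =>
    intro stack j h
    simp only [loopPush, popAllB_stop order n stack j h]
    exact ih _ _ h

lemma loopPush_stuck (order : List Int) (n : Int) (t : Int) : ∀ (bs stack : List Int) (j : Int),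
    PySem.List.pyGet? order j = some t → stack.getLast? ≠ some t → (∀ b ∈ bs, b ≠ t) →
    loopPush order n bs stack j = j := by
  intro bs
  induction bs with
  | nil => intro stack j ht hl _; simp only [loopPush, popAllB_noop order n stack j t ht hl]
  | cons b bs ih =>
    intro stack j ht hl hb
    simp only [loopPush, popAllB_noop order n stack j t ht hl]
    exact ih (stack ++ [b]) j ht
      (by simp only [List.getLast?_concat]; intro e; exact hb b (by simp) (by injection e))
      (fun x hx => hb x (by simp [hx]))

lemma loopPush_push_run (order : List Int) (n t j : Int)
    (ht : PySem.List.pyGet? order j = some t) (htn : t ≤ n) :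
    ∀ (k : Nat) (c : Int) (stack : List Int), (t + 1 - c).toNat = k → c ≤ t →
    stack.getLast? ≠ some t →
    loopPush order n (PySem.List.pyRange c (n + 1) 1) stack j =
      loopPush order n (PySem.List.pyRange (t + 1) (n + 1) 1)
        (stack ++ PySem.List.pyRange c (t + 1) 1) j := by
  intro k
  induction k with
  | zero => intro c stack hk hc _; omega
  | succ k ih =>
    intro c stack hk hc hl
    rw [PySem.List.pyRange_one_cons (show c < n + 1 by omega)]
    simp only [loopPush, popAllB_noop order n stack j t ht hl]
    by_cases hct : c = t
    · subst hct
      rw [show PySem.List.pyRange c (c + 1) 1 = [c] from PySem.List.pyRange_one_singleton c]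
    · have := ih (c + 1) (stack ++ [c]) (by omega) (by omega)
        (by simp only [List.getLast?_concat]; intro e; exact hct (by injection e))
      rw [this, PySem.List.pyRange_one_cons (show c < t + 1 by omega), List.append_assoc]
      rfl

lemma getLast?_append_concat (s x : List Int) (t : Int) :
    (s ++ (x ++ [t])).getLast? = some t := by
  rw [← List.append_assoc, List.getLast?_concat]

lemma dropLast_append_concat (s x : List Int) (t : Int) :
    (s ++ (x ++ [t])).dropLast = s ++ x := by
  rw [← List.append_assoc, List.dropLast_concat]

-- main bridge: truck-driven loop with front pointer = box-driven loop of B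
lemma loopT_eq_loopPush (order : List Int) : ∀ (targets stack : List Int) (c j : Int),
    0 ≤ j → targets = order.drop j.toNat →
    loopT targets stack c (order.length : Int) j =
      loopPush order (order.length : Int) (PySem.List.pyRange c ((order.length : Int) + 1) 1) stack j := by
  intro targets
  induction targets with
  | nil =>
    intro stack c j hj hdrop
    have hn : ¬ j < (order.length : Int) := by
      have : order.length ≤ j.toNat := List.drop_eq_nil_iff.mp hdrop.symm
      omega
    simp only [loopT]
    exact (loopPush_done order _ _ stack j hn).symm
  | cons t rest ih =>
    intro stack c j hj hdrop
    have hjlt : j.toNat < order.length := by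
      by_contra h
      rw [List.drop_eq_nil_of_le (by omega)] at hdrop
      simp at hdrop
    have hjn : j < (order.length : Int) := by omega
    have hget : PySem.List.pyGet? order j = some t := by
      rw [PySem.List.pyGet?_of_nonneg order hj, ← List.head?_drop, ← hdrop]
      rfl
    have hrest : rest = order.drop (j + 1).toNat := by
      rw [show (j + 1).toNat = j.toNat + 1 by omega, ← List.tail_drop, ← hdrop,
        List.tail_cons]
    simp only [loopT]
    by_cases hl : stack.getLast? = some t
    · rw [if_pos hl, ih stack.dropLast c (j + 1) (by omega) hrest]
      exact (loopPush_congr order _ _ _ _ _ _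
        (popAllB_pop order _ stack j t hjn hl hget)).symm
    · rw [if_neg hl]
      by_cases hm : c ≤ t ∧ t ≤ (order.length : Int)
      · rw [if_pos hm]
        rw [ih (stack ++ PySem.List.pyRange c t 1) (t + 1) (j + 1) (by omega) hrest]
        rw [loopPush_push_run order _ t j hget hm.2 (t + 1 - c).toNat c stack rfl hm.1 hl]
        apply loopPush_congr
        rw [PySem.List.pyRange_one_succ_right hm.1,
          popAllB_pop order _ (stack ++ (PySem.List.pyRange c t 1 ++ [t])) j t hjn
            (getLast?_append_concat _ _ _) hget,
          dropLast_append_concat]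
      · rw [if_neg hm]
        exact (loopPush_stuck order _ t _ stack j hget hl
          (fun b hb => by rw [PySem.List.mem_pyRange_one] at hb; omega)).symm

lemma solution_eq (t : Int) (rest : List Int) :
    solution (t :: rest) = solution_alt (t :: rest) := by
  have hN : (0:Int) ≤ ((t :: rest).length : Int) := by positivity
  set N : Int := ((t :: rest).length : Int) with hNdef
  simp only [solution, PySem.List.pyGet?_zero_cons, map_add_one_pyRange]
  rw [slice_to_pyRange N (t - 1) hN, slice_from_pyRange N t hN,
      PySem.List.slice_from_one, List.tail_cons]
  rw [loopA_eq_loopT rest _ (clampI t N + 1) N 1]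
  simp only [solution_alt]
  rw [slice_to_pyRange N (t - 1) hN, slice_from_pyRange N t hN, ← hNdef]
  have := loopT_eq_loopPush (t :: rest) rest
    (PySem.List.pyRange 1 (clampI (t - 1) N + 1) 1) (clampI t N + 1) 1 (by omega)
    (by simp)
  rw [← hNdef] at this
  exact this

-- ===== VERDICT =====
theorem solution_spec : Claim_equal_solution := by
  intro order _hdom hpre
  cases order with
  | nil => exact absurd rfl hpre
  | cons t rest => exact solution_eq t rest
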